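-- pv_equiv track=rewrite | github.com/kamilGie/ASRT-WDI | Zestaw_8:_Wyszukiwanie_i_sortowanie/225/Rozwiązania/main.py | Zadanie_225
-- ===== SOURCE A (Python) =====
-- def sort(T):
--     """Quicksort"""
--     # Warunek zakończenia rekurencji
--     if len(T) <= 1:
--         return T
--
--     # Wybór pivota (środkowy element)
--     pivot = T[len(T) // 2]
--
--     # Podział na trzy części: mniejsze, równe, większe
--     less = [x for x in T if x < pivot]
--     equal = [x for x in T if x == pivot]
--     greater = [x for x in T if x > pivot]
--
--     # Rekurencyjne sortowanie części "less" i "greater"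
--     return sort(less) + equal + sort(greater)
--
-- def Zadanie_225(T):
--     # Wartości różne od zera
--     non_zero_values = [x for x in T if x != 0]
--
--     # Sortuje wartosci rozne od zera
--     sorted = sort(non_zero_values)
--
--     # Wstawiamy posortowane wartości z powrotem
--     idx = 0
--     for i in range(len(T)):
--         if T[i] != 0:
--             T[i] = sorted[idx]
--             idx += 1
--
--     return T
-- ===== SOURCE B (Python) =====
-- def Zadanie_225(T):
--     it = iter(sorted(x for x in T if x != 0))
--     for i, x in enumerate(T):
--         if x != 0:
--             T[i] = next(it)
--     return T
-- ===== Notes on version B (the rewrite author's own statement) =====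
-- stated objective: simpler
-- what changed: Replaces the hand-written recursive three-way quicksort plus index/counter reinsertion loop with one built-in sorted() call whose values are consumed through an iterator while enumerating T.
import Mathlib
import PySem

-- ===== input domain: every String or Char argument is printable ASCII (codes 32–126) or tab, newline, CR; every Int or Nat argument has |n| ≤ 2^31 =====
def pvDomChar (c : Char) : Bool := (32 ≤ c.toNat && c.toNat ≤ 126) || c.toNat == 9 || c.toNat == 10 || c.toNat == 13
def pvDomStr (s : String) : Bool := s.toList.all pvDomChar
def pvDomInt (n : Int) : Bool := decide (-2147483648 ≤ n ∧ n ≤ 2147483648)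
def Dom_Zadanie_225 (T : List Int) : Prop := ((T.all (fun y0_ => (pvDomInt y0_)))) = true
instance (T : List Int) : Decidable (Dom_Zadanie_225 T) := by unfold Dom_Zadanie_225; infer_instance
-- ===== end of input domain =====

-- B replaces A's hand-written recursive quicksort and index/counter reinsertion loop by one
-- built-in stable sort plus a single walk consuming the sorted values in order.
-- A mutates its argument T in place and returns it (B does the same); the equivalence proved
-- here is about the return value.

-- ===== PORT A =====
-- termination helpers for the quicksort port (cited by name in decreasing_by)
theorem len_filter_attach {α : Type} (T : List α) (p : α → Bool) :
    (List.filter (fun x => p x.1) T.attach).length = (T.filter p).length := by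
  rw [← List.countP_eq_length_filter, ← List.countP_eq_length_filter, List.countP_attach]

theorem pySort_filter_lt {p : Int → Bool} {T : List Int} (x : Int) (hx : x ∈ T)
    (hpx : p x = false) : (T.filter p).length < T.length := by
  apply List.length_filter_lt_length_iff_exists.mpr
  exact ⟨x, hx, by simp [hpx]⟩

theorem pySort_pivot_mem (T : List Int) (h : ¬ T.length ≤ 1) : T.getD (T.length / 2) 0 ∈ T := by
  have hlt : T.length / 2 < T.length := by omega
  clear h
  rw [List.getD_eq_getElem T 0 hlt]
  exact List.getElem_mem hlt

-- quicksort with the middle element as pivot; the pivot index is always in range, so getD 0 is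
-- only a totalization guard
def pySort (T : List Int) : List Int :=
  if h : T.length ≤ 1 then T
  else
    let pivot := T.getD (T.length / 2) 0
    pySort (T.filter (fun x => decide (x < pivot))) ++ T.filter (fun x => x == pivot)
      ++ pySort (T.filter (fun x => decide (pivot < x)))
termination_by T.length
decreasing_by
  · simp only [List.length_unattach]
    refine lt_of_eq_of_lt (len_filter_attach T (fun x => decide (x < T.getD (T.length / 2) 0))) ?_
    exact pySort_filter_lt _ (pySort_pivot_mem T h) (by simp)
  · simp only [List.length_unattach]
    refine lt_of_eq_of_lt (len_filter_attach T (fun x => decide (T.getD (T.length / 2) 0 < x))) ?_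
    exact pySort_filter_lt _ (pySort_pivot_mem T h) (by simp)


-- the reinsertion loop: indices from range(len(T)) are nonnegative (toNat exact) and in range,
-- and idx stays below len(sorted), so the getD 0 guards are only totalizations
def Zadanie_225 (T : List Int) : List Int :=
  let s := pySort (T.filter (fun x => x != 0))
  ((PySem.List.pyRange 0 (T.length : Int) 1).foldl
    (fun (st : List Int × Int) (i : Int) =>
      if (PySem.List.pyGet? st.1 i).getD 0 ≠ 0 then
        (st.1.set i.toNat ((PySem.List.pyGet? s st.2).getD 0), st.2 + 1)
      else st) (T, 0)).1


-- ===== PORT B =====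
-- walk T, replacing each non-zero slot by the next sorted value; the [] case is unreachable
-- (the sorted list holds exactly one value per non-zero slot)
def fillSorted : List Int → List Int → List Int
  | [], _ => []
  | x :: t, s =>
    if x ≠ 0 then
      match s with
      | v :: s' => v :: fillSorted t s'
      | [] => []
    else x :: fillSorted t s


def Zadanie_225_alt (T : List Int) : List Int :=
  fillSorted T (PySem.List.sorted (T.filter (fun x => x != 0)) (fun x => x) false)


-- ===== PRECONDITION & SPEC =====
def Spec_Zadanie_225 (T : List Int) (out : List Int) : Prop := out = Zadanie_225_alt T
instance (T : List Int) (out : List Int) : Decidable (Spec_Zadanie_225 T out) := by unfold Spec_Zadanie_225; infer_instance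

-- ===== CLAIM (what is proved, stated in full; the proofs are below) =====
def Claim_equal_Zadanie_225 : Prop := ∀ (T : List Int), Dom_Zadanie_225 T → Spec_Zadanie_225 T (Zadanie_225 T)

-- ===== LEMMAS AND PROOFS =====

theorem part_perm (p : Int) (l : List Int) :
    ((l.filter (fun x => decide (x < p))) ++ l.filter (fun x => x == p)
      ++ l.filter (fun x => decide (p < x))).Perm l := by
  induction l with
  | nil => simp
  | cons a t ih =>
    rcases lt_trichotomy a p with h | h | h
    · simpa [List.filter_cons, h, not_lt.mpr h.le, ne_of_lt h] using ih.cons a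
    · subst h
      have h1 : ¬ a < a := lt_irrefl a
      simp only [List.filter_cons, decide_eq_true_eq, if_neg h1, beq_self_eq_true, if_true]
      have e : List.filter (fun x => decide (x < a)) t ++ (a :: List.filter (fun x => x == a) t)
            ++ List.filter (fun x => decide (a < x)) t
          = List.filter (fun x => decide (x < a)) t ++ a :: (List.filter (fun x => x == a) t
            ++ List.filter (fun x => decide (a < x)) t) := by simp
      rw [e]
      exact List.perm_middle.trans
        ((by simpa [List.append_assoc] using ih :
          (List.filter (fun x => decide (x < a)) t ++ (List.filter (fun x => x == a) t
            ++ List.filter (fun x => decide (a < x)) t)).Perm t).cons a)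
    · have h1 : ¬ a < p := not_lt.mpr h.le
      have h2 : (a == p) = false := by simp [ne_of_gt h]
      simp only [List.filter_cons, decide_eq_true_eq, if_neg h1, h2, if_neg Bool.false_ne_true,
        if_pos h]
      exact List.perm_middle.trans (ih.cons a)


theorem pySort_len_induction (motive : List Int → Prop)
    (step : ∀ T : List Int, (∀ S : List Int, S.length < T.length → motive S) → motive T) :
    ∀ T, motive T := by
  intro T
  induction hn : T.length using Nat.strong_induction_on generalizing T with
  | _ n ih =>
    exact step T (fun S hS => ih S.length (by omega) S rfl)


theorem pySort_perm (T : List Int) : (pySort T).Perm T := by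
  induction T using pySort_len_induction with
  | step T ih =>
    rw [pySort]
    by_cases h : T.length ≤ 1
    · simp [h]
    · simp only [dif_neg h]
      have hmem := pySort_pivot_mem T h
      refine List.Perm.trans ?_ (part_perm (T.getD (T.length / 2) 0) T)
      exact ((ih _ (pySort_filter_lt _ hmem (by simp))).append (List.Perm.refl _)).append
        (ih _ (pySort_filter_lt _ hmem (by simp)))


theorem mem_pySort {x : Int} {T : List Int} : x ∈ pySort T ↔ x ∈ T :=
  (pySort_perm T).mem_iff


theorem pySort_pairwise (T : List Int) : (pySort T).Pairwise (· ≤ ·) := by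
  induction T using pySort_len_induction with
  | step T ih =>
    rw [pySort]
    by_cases h : T.length ≤ 1
    · simp only [dif_pos h]
      match T, h with
      | [], _ => simp
      | [a], _ => simp
    · simp only [dif_neg h]
      have hmem := pySort_pivot_mem T h
      set p := T.getD (T.length / 2) 0 with hp
      rw [List.append_assoc, List.pairwise_append]
      refine ⟨ih _ (pySort_filter_lt _ hmem (by simp)), ?_, ?_⟩
      · rw [List.pairwise_append]
        refine ⟨?_, ih _ (pySort_filter_lt _ hmem (by simp)), ?_⟩
        · apply List.pairwise_of_forall_mem_list
          intro a ha b hb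
          have ha' := List.of_mem_filter ha
          have hb' := List.of_mem_filter hb
          simp only [beq_iff_eq] at ha' hb'
          omega
        · intro a ha b hb
          have ha' := List.of_mem_filter ha
          have hb' := List.of_mem_filter (mem_pySort.mp hb)
          simp only [beq_iff_eq] at ha'
          simp only [decide_eq_true_eq] at hb'
          omega
      · intro a ha b hb
        have ha' := List.of_mem_filter (mem_pySort.mp ha)
        simp only [decide_eq_true_eq] at ha'
        rcases List.mem_append.mp hb with hb | hb
        · have hb' := List.of_mem_filter hb
          simp only [beq_iff_eq] at hb'
          omega
        · have hb' := List.of_mem_filter (mem_pySort.mp hb)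
          simp only [decide_eq_true_eq] at hb'
          omega


theorem pySort_eq (T : List Int) : pySort T = PySem.List.sorted T (fun x => x) false :=
  (PySem.List.sorted_id_eq_of_perm_of_pairwise T (pySort T) (pySort_perm T) (pySort_pairwise T)).symm


theorem set_len_append (pre : List Int) (x v : Int) (t : List Int) :
    (pre ++ x :: t).set pre.length v = pre ++ v :: t := by
  induction pre with
  | nil => simp
  | cons a pre ih => simp [ih]


theorem loopA_inv (s : List Int) (suf : List Int) : ∀ (pre : List Int) (j : Nat),
    (suf.filter (fun x => x != 0)).length + j ≤ s.length →
    ((PySem.List.pyRange (pre.length : Int) (((pre.length + suf.length : Nat) : Int)) 1).foldl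
      (fun (st : List Int × Int) (i : Int) =>
        if (PySem.List.pyGet? st.1 i).getD 0 ≠ 0 then
          (st.1.set i.toNat ((PySem.List.pyGet? s st.2).getD 0), st.2 + 1)
        else st) (pre ++ suf, (j : Int))).1 = pre ++ fillSorted suf (s.drop j) := by
  induction suf with
  | nil =>
    intro pre j _
    rw [PySem.List.pyRange_one]
    simp [fillSorted]
  | cons x t ih =>
    intro pre j hj
    have hcons : PySem.List.pyRange (pre.length : Int) (((pre.length + (x :: t).length : Nat) : Int)) 1
        = (pre.length : Int) :: PySem.List.pyRange ((pre.length : Int) + 1)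
            (((pre.length + (x :: t).length : Nat) : Int)) 1 := by
      apply PySem.List.pyRange_one_cons
      push_cast [List.length_cons]
      omega
    rw [hcons, List.foldl_cons]
    have hget : (PySem.List.pyGet? (pre ++ x :: t) (pre.length : Int)).getD 0 = x := by
      rw [PySem.List.pyGet?_append_length]; rfl
    by_cases hx : x ≠ 0
    · simp only [hget, if_pos hx]
      have hflen : (List.filter (fun x => x != 0) (x :: t)).length
          = (List.filter (fun x => x != 0) t).length + 1 := by
        simp [hx]
      have hj' : (List.filter (fun x => x != 0) t).length + (j + 1) ≤ s.length := by
        rw [hflen] at hj; omega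
      have hjlt : j < s.length := by omega
      have hv : (PySem.List.pyGet? s ((j : Nat) : Int)).getD 0 = s[j] := by
        rw [PySem.List.pyGet?_natCast, List.getElem?_eq_getElem hjlt]; rfl
      have hset : (pre ++ x :: t).set ((pre.length : Int)).toNat s[j] = (pre ++ [s[j]]) ++ t := by
        rw [Int.toNat_natCast, set_len_append]; simp
      have hstep := ih (pre ++ [s[j]]) (j + 1) hj'
      have hlen : (((pre ++ [s[j]]).length : Nat) : Int) = (pre.length : Int) + 1 := by simp
      have hlen2 : ((((pre ++ [s[j]]).length + t.length : Nat)) : Int)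
          = (((pre.length + (x :: t).length : Nat)) : Int) := by simp only [List.length_append, List.length_cons, List.length_nil]; push_cast; omega
      rw [hlen, hlen2] at hstep
      have hcast : ((j : Int) + 1) = (((j + 1 : Nat)) : Int) := by push_cast; ring
      show ((PySem.List.pyRange ((pre.length : Int) + 1) (((pre.length + (x :: t).length : Nat) : Int)) 1).foldl
        _ ((pre ++ x :: t).set ((pre.length : Int)).toNat ((PySem.List.pyGet? s (j : Int)).getD 0), (j : Int) + 1)).1
        = pre ++ fillSorted (x :: t) (s.drop j)
      rw [hv, hset, hcast, hstep]
      have hdrop : s.drop j = s[j] :: s.drop (j + 1) := List.drop_eq_getElem_cons hjlt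
      rw [hdrop]
      simp only [fillSorted, if_pos hx, List.append_assoc, List.cons_append, List.nil_append]
    · have hx0 : x = 0 := not_ne_iff.mp hx
      subst hx0
      simp only [hget, if_neg (by decide : ¬ ((0 : Int) ≠ 0))]
      have hj' : (List.filter (fun x => x != 0) t).length + j ≤ s.length := by
        have hflen : (List.filter (fun x => x != 0) ((0 : Int) :: t)).length
            = (List.filter (fun x => x != 0) t).length := by simp
        rw [hflen] at hj; omega
      have hstep := ih (pre ++ [(0 : Int)]) j hj'
      have hlen : (((pre ++ [(0 : Int)]).length : Nat) : Int) = (pre.length : Int) + 1 := by simp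
      have hlen2 : ((((pre ++ [(0 : Int)]).length + t.length : Nat)) : Int)
          = (((pre.length + ((0 : Int) :: t).length : Nat)) : Int) := by simp only [List.length_append, List.length_cons, List.length_nil]; push_cast; omega
      rw [hlen, hlen2] at hstep
      have he : pre ++ (0 : Int) :: t = (pre ++ [(0 : Int)]) ++ t := by simp
      rw [he, hstep]
      simp [fillSorted]


-- ===== VERDICT (by name: the statement is the Claim_ definition above) =====
theorem Zadanie_225_spec : Claim_equal_Zadanie_225 := by
  intro T _
  unfold Spec_Zadanie_225 Zadanie_225 Zadanie_225_alt
  have hlen : (pySort (T.filter (fun x => x != 0))).length = (T.filter (fun x => x != 0)).length :=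
    (pySort_perm _).length_eq
  have h := loopA_inv (pySort (T.filter (fun x => x != 0))) T [] 0 (by simp [hlen])
  simp only [List.nil_append, List.length_nil, Nat.cast_zero, List.drop_zero, Nat.zero_add] at h
  rw [← pySort_eq]
  exact h
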